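-- pv_equiv track=rewrite | github.com/satria64/gestfatture | integration_pec.py | identify_institutional_sender
-- ===== SOURCE A (Python) =====
-- INSTITUTIONAL_DOMAINS = {
--     "agenziaentrate.it":         "Agenzia delle Entrate",
--     "pec.agenziaentrate.it":     "Agenzia delle Entrate",
--     "pce.agenziaentrate.it":     "Agenzia delle Entrate",
--     "agenziariscossione.gov.it": "Agenzia Riscossione",
--     "pec.agenziariscossione.gov.it": "Agenzia Riscossione",
--     "inps.gov.it":               "INPS",
--     "postacert.inps.gov.it":     "INPS",
--     "pec.inps.gov.it":           "INPS",
--     "inail.it":                  "INAIL",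
--     "inail.gov.it":              "INAIL",
--     "pec.inail.it":              "INAIL",
--     "postacert.inail.gov.it":    "INAIL",
-- }
--
-- def identify_institutional_sender(email_addr: str) -> str | None:
--     """Restituisce l'etichetta del mittente istituzionale o None."""
--     if not email_addr:
--         return None
--     domain = email_addr.split("@", 1)[-1].lower().strip(">").strip()
--     for d, label in INSTITUTIONAL_DOMAINS.items():
--         if d == domain or domain.endswith("." + d):
--             return label
--     return None
-- ===== SOURCE B (Python) =====
-- INSTITUTIONAL_DOMAINS = {
--     "agenziaentrate.it":         "Agenzia delle Entrate",
--     "pec.agenziaentrate.it":     "Agenzia delle Entrate",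
--     "pce.agenziaentrate.it":     "Agenzia delle Entrate",
--     "agenziariscossione.gov.it": "Agenzia Riscossione",
--     "pec.agenziariscossione.gov.it": "Agenzia Riscossione",
--     "inps.gov.it":               "INPS",
--     "postacert.inps.gov.it":     "INPS",
--     "pec.inps.gov.it":           "INPS",
--     "inail.it":                  "INAIL",
--     "inail.gov.it":              "INAIL",
--     "pec.inail.it":              "INAIL",
--     "postacert.inail.gov.it":    "INAIL",
-- }
--
-- def identify_institutional_sender(email_addr: str) -> str | None:
--     """Suffix walk: try the whole domain, then the part after each '.', with
--     one dict lookup per step instead of scanning the whole table."""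
--     if not email_addr:
--         return None
--     suffix = email_addr.split("@", 1)[-1].lower().strip(">").strip()
--     while True:
--         label = INSTITUTIONAL_DOMAINS.get(suffix)
--         if label is not None:
--             return label
--         _, sep, rest = suffix.partition(".")
--         if not sep:
--             return None
--         suffix = rest
-- ===== Notes on version B (the rewrite author's own statement) =====
-- stated objective: idiomatic
-- what changed: B replaces A's linear scan of the whole INSTITUTIONAL_DOMAINS table with endswith tests by a most-specific-first suffix walk over the domain's dot-separated suffixes, doing one dict lookup per suffix; this agrees with A because any two suffix-comparable table keys carry the same label (proved as a finite table fact).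
import Mathlib
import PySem

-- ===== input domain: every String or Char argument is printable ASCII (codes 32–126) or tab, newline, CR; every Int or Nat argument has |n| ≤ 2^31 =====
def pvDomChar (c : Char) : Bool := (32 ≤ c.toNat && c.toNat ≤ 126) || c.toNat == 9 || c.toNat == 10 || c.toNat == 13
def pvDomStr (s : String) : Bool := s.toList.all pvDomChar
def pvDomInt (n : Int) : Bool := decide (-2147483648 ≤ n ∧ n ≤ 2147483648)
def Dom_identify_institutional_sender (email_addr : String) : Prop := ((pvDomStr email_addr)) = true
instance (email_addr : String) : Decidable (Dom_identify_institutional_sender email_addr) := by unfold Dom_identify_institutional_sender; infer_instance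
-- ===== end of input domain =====

-- B replaces A's full-table endswith scan by a most-specific-first suffix walk with one
-- dict lookup per dot-separated suffix (objective: idiomatic/alternative; same observable value).

-- ===== PORT A =====
-- the module constant INSTITUTIONAL_DOMAINS (a dict → association list in insertion order)
def pvTable : List (String × String) :=
  [("agenziaentrate.it",             "Agenzia delle Entrate"),
   ("pec.agenziaentrate.it",         "Agenzia delle Entrate"),
   ("pce.agenziaentrate.it",         "Agenzia delle Entrate"),
   ("agenziariscossione.gov.it",     "Agenzia Riscossione"),
   ("pec.agenziariscossione.gov.it", "Agenzia Riscossione"),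
   ("inps.gov.it",                   "INPS"),
   ("postacert.inps.gov.it",         "INPS"),
   ("pec.inps.gov.it",               "INPS"),
   ("inail.it",                      "INAIL"),
   ("inail.gov.it",                  "INAIL"),
   ("pec.inail.it",                  "INAIL"),
   ("postacert.inail.gov.it",        "INAIL")]

-- email_addr.split("@", 1)[-1].lower().strip(">").strip()  (identical line in A and in B)
def pvExtractDomain (email_addr : String) : List Char :=
  let parts := (PySem.Str.splitMax? email_addr "@" 1).getD []   -- sep "@" ≠ "", always some
  let last := PySem.List.pyGetD parts (-1) ""                   -- [-1]; split is never empty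
  PySem.Chars.strip (PySem.Chars.stripChars (PySem.Chars.lower last.toList) ['>'])

-- d == domain or domain.endswith("." + d)
def pvMatchKey (d : String) (dom : List Char) : Bool :=
  d.toList == dom || PySem.Chars.endswith dom ('.' :: d.toList)

-- the for-loop over INSTITUTIONAL_DOMAINS.items() with early return
def pvScan : List (String × String) → List Char → Option String
  | [], _ => none
  | (d, label) :: rest, dom => if pvMatchKey d dom then some label else pvScan rest dom

def identify_institutional_sender (email_addr : String) : Option String :=
  if email_addr = "" then none
  else pvScan pvTable (pvExtractDomain email_addr)

-- ===== PORT B =====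
-- suffix.partition(".") step of Source B, ported by hand (exact): the part after the
-- first '.', none when '.' does not occur (the `if not sep: return None` branch)
def pvAfterDot : List Char → Option (List Char)
  | [] => none
  | c :: rest => if c = '.' then some rest else pvAfterDot rest

-- needed by pvWalk's termination
theorem pvAfterDot_length : ∀ {s s' : List Char}, pvAfterDot s = some s' → s'.length < s.length
  | c :: rest, s', h => by
    by_cases hc : c = '.'
    · simp [pvAfterDot, hc] at h
      simp [← h]
    · simp only [pvAfterDot, if_neg hc] at h
      exact Nat.lt_trans (pvAfterDot_length h) (by simp)

-- INSTITUTIONAL_DOMAINS.get(suffix)  (dict lookup = first match in the association list)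
def pvLookup (dom : List Char) : Option String :=
  (pvTable.find? (fun p => p.1.toList == dom)).map (·.2)

-- the while-loop of Source B
def pvWalk (dom : List Char) : Option String :=
  match pvLookup dom with
  | some l => some l
  | none =>
    match h : pvAfterDot dom with
    | none => none
    | some rest => pvWalk rest
termination_by dom.length
decreasing_by exact pvAfterDot_length h

def identify_institutional_sender_alt (email_addr : String) : Option String :=
  if email_addr = "" then none
  else pvWalk (pvExtractDomain email_addr)

-- ===== PRECONDITION & SPEC =====
def Spec_identify_institutional_sender (email_addr : String) (out : Option String) : Prop := out = identify_institutional_sender_alt email_addr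
instance (email_addr : String) (out : Option String) : Decidable (Spec_identify_institutional_sender email_addr out) := by unfold Spec_identify_institutional_sender; infer_instance

-- ===== CLAIM (what is proved, stated in full; the proofs are below) =====
def Claim_equal_identify_institutional_sender : Prop := ∀ (email_addr : String), Dom_identify_institutional_sender email_addr → Spec_identify_institutional_sender email_addr (identify_institutional_sender email_addr)

-- ===== LEMMAS AND PROOFS =====

theorem pvAfterDot_none : ∀ {s : List Char}, pvAfterDot s = none → '.' ∉ s
  | [], _ => by simp
  | c :: rest, h => by
    by_cases hc : c = '.'
    · simp [pvAfterDot, hc] at h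
    · simp only [pvAfterDot, if_neg hc] at h
      simp [Ne.symm hc, pvAfterDot_none h]

theorem pvAfterDot_some : ∀ {s s' : List Char}, pvAfterDot s = some s' →
    ∃ pre, s = pre ++ '.' :: s' ∧ '.' ∉ pre
  | c :: rest, s', h => by
    by_cases hc : c = '.'
    · simp [pvAfterDot, hc] at h
      exact ⟨[], by simp [hc, h], by simp⟩
    · simp only [pvAfterDot, if_neg hc] at h
      obtain ⟨pre, hpre, hnd⟩ := pvAfterDot_some h
      exact ⟨c :: pre, by simp [hpre], by simp [hnd, Ne.symm hc]⟩

-- the core suffix fact: which keys the endswith test matches after cutting at the first dot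
theorem dotSuffix_split {pre s' k : List Char} (hnd : '.' ∉ pre) :
    ('.' :: k) <:+ (pre ++ '.' :: s') ↔ (k = s' ∨ ('.' :: k) <:+ s') := by
  constructor
  · rintro ⟨u, hu⟩
    rcases List.prefix_or_prefix_of_prefix (hu ▸ List.prefix_append u ('.' :: k))
        (List.prefix_append pre ('.' :: s')) with ⟨v, hv⟩ | ⟨w, hw⟩
    · -- pre = u ++ v
      rw [← hv, List.append_assoc] at hu
      have hv2 := List.append_cancel_left hu
      cases v with
      | nil => simp at hv2; exact Or.inl hv2
      | cons a v' =>
        exfalso; apply hnd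
        simp only [List.cons_append] at hv2
        obtain ⟨ha, -⟩ := List.cons.inj hv2
        rw [← hv]; simp [← ha]
    · -- u = pre ++ w
      rw [← hw, List.append_assoc] at hu
      have hw2 := List.append_cancel_left hu
      cases w with
      | nil => simp at hw2; exact Or.inl hw2
      | cons a w' =>
        right
        simp only [List.cons_append] at hw2
        obtain ⟨-, h2⟩ := List.cons.inj hw2
        exact ⟨w', h2⟩
  · rintro (rfl | hsuf)
    · exact ⟨pre, rfl⟩
    · exact (hsuf.trans (List.suffix_cons '.' s')).trans (List.suffix_append pre _)

theorem pvMatchKey_suffix {d : String} {dom : List Char} (h : pvMatchKey d dom = true) :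
    d.toList <:+ dom := by
  simp only [pvMatchKey, Bool.or_eq_true, beq_iff_eq] at h
  rcases h with rfl | h
  · exact List.suffix_refl _
  · exact (List.suffix_cons '.' d.toList).trans ((PySem.Chars.endswith_iff _ _).mp h)

-- table fact: suffix-comparable keys always carry the same label (finite check)
theorem pvTable_pairwise : ∀ p ∈ pvTable, ∀ q ∈ pvTable, p.1.toList <:+ q.1.toList → p.2 = q.2 := by
  decide

theorem pvScan_some : ∀ {t : List (String × String)} {dom : List Char} {l : String},
    pvScan t dom = some l → ∃ d, (d, l) ∈ t ∧ pvMatchKey d dom = true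
  | (d, lab) :: rest, dom, l, h => by
    by_cases hm : pvMatchKey d dom = true
    · simp only [pvScan, if_pos hm, Option.some.injEq] at h
      exact ⟨d, by simp [h], hm⟩
    · simp only [pvScan, if_neg hm] at h
      obtain ⟨d', hmem, hm'⟩ := pvScan_some h
      exact ⟨d', by simp [hmem], hm'⟩

theorem pvScan_none : ∀ {t : List (String × String)} {dom : List Char},
    (∀ d l, (d, l) ∈ t → pvMatchKey d dom = false) → pvScan t dom = none
  | [], _, _ => rfl
  | (d, lab) :: rest, dom, h => by
    have hd := h d lab (by simp)
    simp only [pvScan, hd, Bool.false_eq_true, if_false]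
    exact pvScan_none (fun d' l' hm => h d' l' (by simp [hm]))

theorem pvScan_eq_none : ∀ {t : List (String × String)} {dom : List Char},
    pvScan t dom = none → ∀ d l, (d, l) ∈ t → pvMatchKey d dom = false
  | [], _, _ => by simp
  | (d0, lab) :: rest, dom, h => by
    by_cases hm : pvMatchKey d0 dom = true
    · simp [pvScan, hm] at h
    · simp only [pvScan, if_neg hm] at h
      intro d l hmem
      rcases List.mem_cons.mp hmem with heq | hmem'
      · obtain ⟨h1, -⟩ := Prod.mk.inj heq
        subst h1; simpa using hm
      · exact pvScan_eq_none h d l hmem'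

-- any matching table entry forces the scan's answer to be that entry's label
theorem pvScan_agree {dom : List Char} {d l : String}
    (hmem : (d, l) ∈ pvTable) (hm : pvMatchKey d dom = true) :
    pvScan pvTable dom = some l := by
  cases hs : pvScan pvTable dom with
  | none =>
    exact absurd hm (by simp [pvScan_eq_none hs d l hmem])
  | some l2 =>
    obtain ⟨d2, hmem2, hm2⟩ := pvScan_some hs
    have h1 := pvMatchKey_suffix hm
    have h2 := pvMatchKey_suffix hm2
    rcases List.suffix_or_suffix_of_suffix h2 h1 with hso | hso
    · exact congrArg some (pvTable_pairwise (d2, l2) hmem2 (d, l) hmem hso).symm ▸ rfl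
    · exact congrArg some (pvTable_pairwise (d, l) hmem (d2, l2) hmem2 hso).symm ▸ rfl

theorem pvLookup_some {dom : List Char} {l : String} (h : pvLookup dom = some l) :
    ∃ d, (d, l) ∈ pvTable ∧ d.toList = dom := by
  simp only [pvLookup, Option.map_eq_some_iff] at h
  obtain ⟨⟨d, l'⟩, hf, hl⟩ := h
  have hmem := List.mem_of_find?_eq_some hf
  have hp := List.find?_some hf
  simp only [beq_iff_eq] at hp
  exact ⟨d, by simpa [← hl] using hmem, hp⟩

theorem pvLookup_none {dom : List Char} (h : pvLookup dom = none) :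
    ∀ d l, (d, l) ∈ pvTable → d.toList ≠ dom := by
  intro d l hmem heq
  simp only [pvLookup, Option.map_eq_none_iff, List.find?_eq_none] at h
  exact absurd (by simpa using heq) (by simpa using h (d, l) hmem)

theorem pvScan_congr : ∀ {t : List (String × String)} {dom dom' : List Char},
    (∀ d l, (d, l) ∈ t → pvMatchKey d dom = pvMatchKey d dom') → pvScan t dom = pvScan t dom'
  | [], _, _, _ => rfl
  | (d, lab) :: rest, dom, dom', h => by
    have hd := h d lab (by simp)
    simp only [pvScan, hd]
    have := pvScan_congr (t := rest) (dom := dom) (dom' := dom')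
      (fun d' l' hm => h d' l' (by simp [hm]))
    simp [this]

theorem pvMatchKey_step {dom rest : List Char} {d : String}
    (ha : pvAfterDot dom = some rest) (hne : d.toList ≠ dom) :
    pvMatchKey d dom = pvMatchKey d rest := by
  obtain ⟨pre, rfl, hnd⟩ := pvAfterDot_some ha
  have hiff : pvMatchKey d (pre ++ '.' :: rest) = true ↔ pvMatchKey d rest = true := by
    simp only [pvMatchKey, Bool.or_eq_true, beq_iff_eq, PySem.Chars.endswith_iff]
    constructor
    · rintro (h | h)
      · exact absurd h hne
      · rcases (dotSuffix_split hnd).mp h with h | h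
        · exact Or.inl h
        · exact Or.inr h
    · rintro (h | h)
      · exact Or.inr ((dotSuffix_split hnd).mpr (Or.inl h))
      · exact Or.inr ((dotSuffix_split hnd).mpr (Or.inr h))
  cases h1 : pvMatchKey d (pre ++ '.' :: rest) <;> cases h2 : pvMatchKey d rest <;>
    simp_all

theorem pvMatchKey_end {dom : List Char} {d : String}
    (ha : pvAfterDot dom = none) (hne : d.toList ≠ dom) :
    pvMatchKey d dom = false := by
  have hnd := pvAfterDot_none ha
  cases h : pvMatchKey d dom
  · rfl
  · exfalso
    simp only [pvMatchKey, Bool.or_eq_true, beq_iff_eq, PySem.Chars.endswith_iff] at h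
    rcases h with h | h
    · exact hne h
    · exact hnd (h.subset (by simp))

theorem pvScan_eq_pvWalk (dom : List Char) : pvScan pvTable dom = pvWalk dom := by
  rw [pvWalk]
  cases hl : pvLookup dom with
  | some l =>
    obtain ⟨d, hmem, hdl⟩ := pvLookup_some hl
    exact pvScan_agree hmem (by simp [pvMatchKey, hdl])
  | none =>
    cases ha : pvAfterDot dom with
    | none =>
      exact pvScan_none (fun d l hmem => pvMatchKey_end ha (pvLookup_none hl d l hmem))
    | some rest =>
      have hlt : rest.length < dom.length := pvAfterDot_length ha
      rw [pvScan_congr (fun d l hmem => pvMatchKey_step ha (pvLookup_none hl d l hmem))]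
      exact pvScan_eq_pvWalk rest
termination_by dom.length

-- ===== VERDICT (by name: the statement is the Claim_ definition above) =====
theorem identify_institutional_sender_spec : Claim_equal_identify_institutional_sender := by
  intro email_addr _
  unfold Spec_identify_institutional_sender identify_institutional_sender identify_institutional_sender_alt
  by_cases h : email_addr = ""
  · simp [h]
  · simp [h, pvScan_eq_pvWalk]
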